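-- pv_equiv track=rewrite | github.com/carbonscott/pyrotein | pyrotein/fasta.py | seq_to_resi
-- ===== SOURCE A (Python) =====
-- def mask_seq(seq, null = '-'):
--     ''' Map False to '-' and True to non '-' in seq index.
--     '''
--     mask = {}
--     for i in range(len(seq)):
--         mask[i] = False if '-' in seq[i] else True
--     return mask
--
-- def seq_to_resi(seq, resi_non_null, null = '-'):
--     ''' Map seq index to resi.
--         seq is a sequence.
--         resi_non_null is the resi to the first non '-' residue.
--     '''
--     seqmask = mask_seq(seq, null = null)
--
--     id_aux = resi_non_null
--     seq_to_resi_dict = {}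
--     for k, v in seqmask.items():
--         if v :
--             seq_to_resi_dict[k] = id_aux
--             id_aux += 1
--         else:
--             seq_to_resi_dict[k] = None
--     return seq_to_resi_dict
-- ===== SOURCE B (Python) =====
-- def seq_to_resi(seq, resi_non_null, null = '-'):
--     ''' Offline formulation: the residue number of a non-gap position i is
--         resi_non_null + (number of non-gap positions strictly before i);
--         gaps map to None.  Computed with a prefix-sum table instead of a
--         running counter threaded through a stateful loop. '''
--     flags = ['-' not in s for s in seq]
--     prefix = [0]
--     t = 0
--     for f in flags:
--         t += f
--         prefix.append(t)
--     return {i: (resi_non_null + prefix[i] if flags[i] else None)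
--             for i in range(len(seq))}
-- ===== Notes on version B (the rewrite author's own statement) =====
-- stated objective: alternative
-- what changed: Replaces A's stateful counter threaded through a loop over a precomputed mask dict by an offline closed-form: a gap-flag list, a prefix-sum table of non-gap counts, and a dict comprehension mapping i to resi_non_null + prefix[i] (or None), so no residue counter is mutated while the result is built.
import Mathlib
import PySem

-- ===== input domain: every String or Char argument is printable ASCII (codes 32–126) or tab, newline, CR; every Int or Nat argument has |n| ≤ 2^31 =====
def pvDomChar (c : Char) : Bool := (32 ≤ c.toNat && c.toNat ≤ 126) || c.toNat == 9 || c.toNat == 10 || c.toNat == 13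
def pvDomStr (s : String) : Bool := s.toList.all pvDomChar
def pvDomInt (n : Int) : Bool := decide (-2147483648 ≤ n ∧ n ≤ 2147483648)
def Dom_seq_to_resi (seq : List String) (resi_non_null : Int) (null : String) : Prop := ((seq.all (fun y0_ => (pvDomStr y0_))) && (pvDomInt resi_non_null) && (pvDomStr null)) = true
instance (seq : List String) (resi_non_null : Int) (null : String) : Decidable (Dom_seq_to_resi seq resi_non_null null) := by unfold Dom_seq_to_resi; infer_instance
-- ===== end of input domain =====

-- B replaces A's running residue counter (threaded through a loop over a precomputed mask dict)
-- by an offline formulation: gap flags, a prefix-sum table of non-gap counts, and a comprehension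
-- mapping each index to resi_non_null + prefix[i] (objective: alternative; return values proved equal).

-- ===== PORT A =====
-- mask_seq(seq, null): mask[i] = False if '-' in seq[i] else True, for i in range(len(seq))
def mask_seq (seq : List String) (null : String) : PySem.Dict Int Bool :=
  (PySem.List.pyRange 0 (seq.length : Int) 1).foldl
    (fun mask i =>
      mask.insert i (if PySem.Str.isIn "-" (PySem.List.pyGetD seq i "") then false else true))
    PySem.Dict.empty

def seq_to_resi (seq : List String) (resi_non_null : Int) (null : String) : List (Int × Option Int) :=
  let seqmask := mask_seq seq null
  let st :=
    seqmask.items.foldl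
      (fun (st : Int × PySem.Dict Int (Option Int)) kv =>
        if kv.2 then (st.1 + 1, st.2.insert kv.1 (some st.1))
        else (st.1, st.2.insert kv.1 none))
      (resi_non_null, PySem.Dict.empty)
  st.2.items

-- ===== PORT B =====
def seq_to_resi_alt (seq : List String) (resi_non_null : Int) (null : String) : List (Int × Option Int) :=
  let flags := seq.map (fun s => !(PySem.Str.isIn "-" s))
  let tp :=
    flags.foldl
      (fun (tp : Int × List Int) f =>
        (tp.1 + (if f then 1 else 0), tp.2 ++ [tp.1 + (if f then 1 else 0)]))
      (0, [0])
  let pre := tp.2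
  let d :=
    (PySem.List.pyRange 0 (PySem.List.len seq) 1).foldl
      (fun (d : PySem.Dict Int (Option Int)) i =>
        d.insert i (if PySem.List.pyGetD flags i false
                    then some (resi_non_null + PySem.List.pyGetD pre i 0)
                    else none))
      PySem.Dict.empty
  d.items

-- ===== PRECONDITION & SPEC =====
def Spec_seq_to_resi (seq : List String) (resi_non_null : Int) (null : String) (out : List (Int × Option Int)) : Prop := out = seq_to_resi_alt seq resi_non_null null
instance (seq : List String) (resi_non_null : Int) (null : String) (out : List (Int × Option Int)) : Decidable (Spec_seq_to_resi seq resi_non_null null out) := by unfold Spec_seq_to_resi; infer_instance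

-- ===== CLAIM (what is proved, stated in full; the proofs are below) =====
def Claim_equal_seq_to_resi : Prop := ∀ (seq : List String) (resi_non_null : Int) (null : String), Dom_seq_to_resi seq resi_non_null null → Spec_seq_to_resi seq resi_non_null null (seq_to_resi seq resi_non_null null)

-- ===== LEMMAS AND PROOFS =====

-- Common reference: the residue list over a list of gap flags, starting at index i, counter c.
def refFlags : List Bool → Int → Int → List (Int × Option Int)
  | [], _, _ => []
  | f :: fs, i, c =>
      if f then (i, some c) :: refFlags fs (i + 1) (c + 1)
      else (i, none) :: refFlags fs (i + 1) c

theorem length_refFlags (l : List Bool) (i c : Int) : (refFlags l i c).length = l.length := by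
  induction l generalizing i c with
  | nil => rfl
  | cons f fs ih => by_cases h : f <;> simp [refFlags, h, ih]

theorem getElem_refFlags (l : List Bool) (i c : Int) (k : Nat) (hk : k < l.length) :
    (refFlags l i c)[k]'(by rw [length_refFlags]; exact hk) =
      (i + k, if l[k] then some (c + ((l.take k).count true : Int)) else none) := by
  induction l generalizing i c k with
  | nil => simp at hk
  | cons f fs ih =>
    cases k with
    | zero => by_cases h : f <;> simp [refFlags, h]
    | succ j =>
      have hj : j < fs.length := by simpa using hk
      by_cases h : f
      · have h2 := ih (i + 1) (c + 1) j hj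
        simp [refFlags, h, h2, List.count_cons]
        constructor
        · omega
        · split <;> simp <;> omega
      · have h2 := ih (i + 1) c j hj
        simp [refFlags, h, h2, List.count_cons]
        omega

-- A's mask dict is built over fresh distinct keys 0..len-1, so its items list
-- is exactly the range paired with the gap bits.
theorem mask_seq_items (seq : List String) (null : String) :
    (mask_seq seq null).items =
      (PySem.List.pyRange 0 (seq.length : Int) 1).map
        (fun i => (i, if PySem.Str.isIn "-" (PySem.List.pyGetD seq i "") then false else true)) := by
  unfold mask_seq
  have h := PySem.Dict.items_foldl_insert_fresh
    (d := (PySem.Dict.empty : PySem.Dict Int Bool))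
    (l := PySem.List.pyRange 0 (seq.length : Int) 1)
    (k := fun i => i)
    (v := fun i => if PySem.Str.isIn "-" (PySem.List.pyGetD seq i "") then false else true)
    (by intro a _; simp [PySem.Dict.contains_empty])
    (by simpa using PySem.List.nodup_pyRange_one (a := 0) (b := (seq.length : Int)))
  simpa using h

-- A's stateful counter loop, phrased over enumerate of the flag list, produces refFlags.
theorem foldA (fs : List Bool) (s c : Int) (d : PySem.Dict Int (Option Int))
    (hd : ∀ j, s ≤ j → d.contains j = false) :
    ((PySem.List.enumerate fs s).foldl
       (fun (st : Int × PySem.Dict Int (Option Int)) p =>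
          if p.2 then (st.1 + 1, st.2.insert p.1 (some st.1))
          else (st.1, st.2.insert p.1 none))
       (c, d)).2.items = d.items ++ refFlags fs s c := by
  induction fs generalizing s c d with
  | nil => simp [PySem.List.enumerate_nil, refFlags]
  | cons f fs ih =>
    have hds : d.contains s = false := hd s le_rfl
    have hins : ∀ (v : Option Int) (j : Int), s + 1 ≤ j → (d.insert s v).contains j = false := by
      intro v j hj
      rw [PySem.Dict.contains_insert]
      have h1 : (j == s) = false := by simp; omega
      have h2 : d.contains j = false := hd j (by omega)
      simp [h1, h2]
    by_cases h : f
    · rw [PySem.List.enumerate_cons]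
      simp only [List.foldl_cons, h, if_true]
      rw [ih (s + 1) (c + 1) (d.insert s (some c)) (hins _),
          PySem.Dict.items_insert_of_not_contains _ _ hds]
      simp [refFlags, h]
    · rw [PySem.List.enumerate_cons]
      simp only [List.foldl_cons, h, Bool.false_eq_true, if_false]
      rw [ih (s + 1) c (d.insert s none) (hins _),
          PySem.Dict.items_insert_of_not_contains _ _ hds]
      simp [refFlags, h]

-- Bridge for A: the port of A computes refFlags of the gap-flag list.
theorem A_eq_ref (seq : List String) (r : Int) (null : String) :
    seq_to_resi seq r null = refFlags (seq.map (fun s => !(PySem.Str.isIn "-" s))) 0 r := by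
  unfold seq_to_resi
  simp only []
  rw [mask_seq_items, List.foldl_map]
  set flags := seq.map (fun s => !(PySem.Str.isIn "-" s)) with hflags
  have hlen : PySem.List.len flags = (seq.length : Int) := by simp [PySem.List.len, hflags]
  have he : PySem.List.enumerate flags 0 =
      (PySem.List.pyRange 0 (seq.length : Int) 1).map (fun j => (j, PySem.List.pyGetD flags j false)) := by
    rw [PySem.List.enumerate_eq_map_pyRange (d := false), hlen]
  have hA := foldA flags 0 r PySem.Dict.empty (by intro j _; simp [PySem.Dict.contains_empty])
  rw [he, List.foldl_map] at hA
  have hcong :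
      (PySem.List.pyRange 0 (seq.length : Int) 1).foldl
        (fun (st : Int × PySem.Dict Int (Option Int)) i =>
          if (if PySem.Str.isIn "-" (PySem.List.pyGetD seq i "") then false else true)
          then (st.1 + 1, st.2.insert i (some st.1))
          else (st.1, st.2.insert i none))
        (r, PySem.Dict.empty)
      = (PySem.List.pyRange 0 (seq.length : Int) 1).foldl
        (fun (st : Int × PySem.Dict Int (Option Int)) i =>
          if PySem.List.pyGetD flags i false
          then (st.1 + 1, st.2.insert i (some st.1))
          else (st.1, st.2.insert i none))
        (r, PySem.Dict.empty) := by
    apply PySem.List.foldl_congr_mem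
    intro st i hi
    have hi' := (PySem.List.mem_pyRange_one).1 hi
    have h0 : (0:Int) ≤ i := hi'.1
    have hilt : i < (seq.length : Int) := hi'.2
    have hflag : PySem.List.pyGetD flags i false = !(PySem.Str.isIn "-" (PySem.List.pyGetD seq i "")) := by
      obtain ⟨k, rfl⟩ : ∃ k : Nat, i = (k : Int) := ⟨i.toNat, by omega⟩
      have hk : k < seq.length := by exact_mod_cast hilt
      rw [PySem.List.pyGetD_natCast, PySem.List.pyGetD_natCast,
          List.getD_eq_getElem _ _ (by simpa [hflags] using hk),
          List.getD_eq_getElem _ _ hk]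
      simp [hflags]
    rw [hflag]
    by_cases h : PySem.Str.isIn "-" (PySem.List.pyGetD seq i "") <;> simp [h]
  rw [hcong]
  simpa using hA

-- The prefix-sum shape: B's fold over the flags builds the partial-sum list.
def scl : List Bool → Int → List Int
  | [], _ => []
  | f :: fs, t => (t + (if f then 1 else 0)) :: scl fs (t + (if f then 1 else 0))

theorem length_scl (l : List Bool) (t : Int) : (scl l t).length = l.length := by
  induction l generalizing t with
  | nil => rfl
  | cons f fs ih => simp [scl, ih]

theorem foldPre (fs : List Bool) (t : Int) (acc : List Int) :
    fs.foldl
      (fun (tp : Int × List Int) f =>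
        (tp.1 + (if f then 1 else 0), tp.2 ++ [tp.1 + (if f then 1 else 0)]))
      (t, acc)
    = (t + (fs.count true : Int), acc ++ scl fs t) := by
  induction fs generalizing t acc with
  | nil => simp [scl]
  | cons f fs ih =>
    simp only [List.foldl_cons]
    rw [ih]
    by_cases h : f
    · simp [h, scl, List.count_cons]
      omega
    · simp [h, scl, List.count_cons]

theorem getElem_scl (l : List Bool) (t : Int) (k : Nat) (hk : k < l.length) :
    (scl l t)[k]'(by rw [length_scl]; exact hk) = t + ((l.take (k + 1)).count true : Int) := by
  induction l generalizing t k with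
  | nil => simp at hk
  | cons f fs ih =>
    cases k with
    | zero => by_cases h : f <;> simp [scl, h, List.count_cons]
    | succ j =>
      have hj : j < fs.length := by simpa using hk
      have h2 := ih (t + (if f then 1 else 0)) j hj
      by_cases h : f <;> simp [h] at h2 <;> simp [scl, h, h2, List.count_cons] <;> omega

theorem preAt (fs : List Bool) (k : Nat) (hk : k < fs.length) :
    ((0 :: scl fs 0 : List Int)).getD k 0 = ((fs.take k).count true : Int) := by
  cases k with
  | zero => simp
  | succ j =>
    have hj : j < fs.length := by omega
    have hlen : j < (scl fs 0).length := by rw [length_scl]; exact hj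
    have := getElem_scl fs 0 j hj
    simp only [List.getD_cons_succ]
    rw [List.getD_eq_getElem _ _ hlen, this]
    simp

-- Bridge for B: the port of B also computes refFlags of the gap-flag list.
theorem B_eq_ref (seq : List String) (r : Int) (null : String) :
    seq_to_resi_alt seq r null = refFlags (seq.map (fun s => !(PySem.Str.isIn "-" s))) 0 r := by
  unfold seq_to_resi_alt
  simp only []
  set flags := seq.map (fun s => !(PySem.Str.isIn "-" s)) with hflags
  have hflen : flags.length = seq.length := by simp [hflags]
  rw [foldPre]
  have hitems := PySem.Dict.items_foldl_insert_fresh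
    (d := (PySem.Dict.empty : PySem.Dict Int (Option Int)))
    (l := PySem.List.pyRange 0 (PySem.List.len seq) 1)
    (k := fun i => i)
    (v := fun i => if PySem.List.pyGetD flags i false
                   then some (r + PySem.List.pyGetD (0 :: scl flags 0) i 0)
                   else none)
    (by intro a _; simp [PySem.Dict.contains_empty])
    (by simpa using PySem.List.nodup_pyRange_one (a := 0) (b := PySem.List.len seq))
  simp only at hitems
  simp only [List.singleton_append]
  rw [hitems]
  simp only [PySem.Dict.items, PySem.Dict.empty, List.nil_append]
  have hlen : PySem.List.len seq = (seq.length : Int) := by simp [PySem.List.len]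
  rw [hlen]
  apply List.ext_getElem
  · simp [length_refFlags, hflen, PySem.List.length_pyRange_one]
  · intro k h1 h2
    have hk : k < seq.length := by
      simpa [PySem.List.length_pyRange_one] using h1
    have hkf : k < flags.length := by omega
    rw [List.getElem_map]
    rw [PySem.List.getElem_pyRange_one]
    have hr := getElem_refFlags flags 0 r k hkf
    rw [hr]
    have hgflag : PySem.List.pyGetD flags ((0:Int) + k) false = flags[k] := by
      rw [show ((0:Int) + k) = (k : Int) by omega]
      rw [PySem.List.pyGetD_natCast]
      exact List.getD_eq_getElem _ _ hkf
    have hgpre : PySem.List.pyGetD (0 :: scl flags 0) ((0:Int) + k) 0 = ((flags.take k).count true : Int) := by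
      rw [show ((0:Int) + k) = (k : Int) by omega]
      rw [PySem.List.pyGetD_natCast]
      exact preAt flags k hkf
    rw [hgflag, hgpre]

-- ===== VERDICT (by name: the statement is the Claim_ definition above) =====
theorem seq_to_resi_spec : Claim_equal_seq_to_resi := by
  intro seq r null _
  unfold Spec_seq_to_resi
  rw [A_eq_ref, B_eq_ref]
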